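-- pv_equiv track=rewrite | github.com/professeu/superprojetdufutur | src/inventory.py | item_position
-- ===== SOURCE A (Python) =====
-- def item_position(i):
--     length = 3
--     x = i
--     y = 0
--     while x >= length:
--         y += 1
--         x -= 3
--     x = 120*x + 20
--     y = 120*y + 20
--     return x, y
-- ===== SOURCE B (Python) =====
-- def item_position(i):
--     if i >= 3:
--         y, x = divmod(i, 3)
--     else:
--         y, x = 0, i
--     return 120*x + 20, 120*y + 20
-- ===== Notes on version B (the rewrite author's own statement) =====
-- stated objective: faster
-- what changed: Replaced the O(i) subtract-3 while loop with a single divmod(i, 3) (keeping x=i, y=0 for i<3, matching the loop's behaviour on negatives).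
import Mathlib
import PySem

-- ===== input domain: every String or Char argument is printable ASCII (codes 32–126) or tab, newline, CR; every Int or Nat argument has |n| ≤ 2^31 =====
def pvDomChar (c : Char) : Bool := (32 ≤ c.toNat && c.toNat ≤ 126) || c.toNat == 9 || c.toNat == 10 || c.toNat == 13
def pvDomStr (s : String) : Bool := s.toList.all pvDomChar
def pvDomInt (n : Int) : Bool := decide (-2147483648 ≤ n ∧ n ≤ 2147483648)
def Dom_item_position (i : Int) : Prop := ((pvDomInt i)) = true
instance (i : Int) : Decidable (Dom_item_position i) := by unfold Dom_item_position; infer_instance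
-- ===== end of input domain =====

-- B replaces A's O(i) subtract-3 loop with a single divmod (O(1)); same return value everywhere.

-- ===== PORT A =====
-- the while loop: while x >= 3: y += 1; x -= 3
def itemLoopA (x y : Int) : Int × Int :=
  if x ≥ 3 then itemLoopA (x - 3) (y + 1) else (x, y)
termination_by x.toNat
decreasing_by omega

def item_position (i : Int) : List Int :=
  let x := i
  let y : Int := 0
  let p := itemLoopA x y
  [120 * p.1 + 20, 120 * p.2 + 20]

-- ===== PORT B =====
def item_position_alt (i : Int) : List Int :=
  let p : Int × Int := if i ≥ 3 then (PySem.Int.floordiv i 3, PySem.Int.mod i 3) else (0, i)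
  [120 * p.2 + 20, 120 * p.1 + 20]

-- ===== PRECONDITION & SPEC =====
def Spec_item_position (i : Int) (out : List Int) : Prop := out = item_position_alt i
instance (i : Int) (out : List Int) : Decidable (Spec_item_position i out) := by unfold Spec_item_position; infer_instance

-- ===== CLAIM (what is proved, stated in full; the proofs are below) =====
def Claim_equal_item_position : Prop := ∀ (i : Int), Dom_item_position i → Spec_item_position i (item_position i)

-- ===== LEMMAS AND PROOFS =====
theorem itemLoopA_char (x y : Int) (hx : 0 ≤ x) :
    itemLoopA x y = (x % 3, y + x / 3) := by
  induction x, y using itemLoopA.induct with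
  | case1 x y h ih =>
    rw [itemLoopA, if_pos h, ih (by omega)]
    have e1 : (x - 3) % 3 = x % 3 := by omega
    have e2 : y + 1 + (x - 3) / 3 = y + x / 3 := by omega
    rw [e1, e2]
  | case2 x y h =>
    rw [itemLoopA, if_neg h]
    have h1 : x % 3 = x := Int.emod_eq_of_lt hx (by omega)
    have h2 : x / 3 = 0 := Int.ediv_eq_zero_of_lt hx (by omega)
    simp [h1, h2]

theorem item_position_spec : Claim_equal_item_position := by
  intro i _
  unfold Spec_item_position item_position item_position_alt
  simp only []
  by_cases h : i ≥ 3
  · rw [itemLoopA_char i 0 (by omega), if_pos h]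
    simp [PySem.Int.floordiv, PySem.Int.mod, Int.fmod_eq_emod, Int.fdiv_eq_ediv]
  · rw [itemLoopA, if_neg h, if_neg h]
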